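-- pv_equiv track=rewrite | github.com/mrsameer/natural-disaster-data-agent | src/etl/transformations.py | classify_disaster_type
-- ===== SOURCE A (Python) =====
-- from typing import Optional, Tuple
--
-- def classify_disaster_type(disaster_text: str) -> Tuple[str, str, Optional[str]]:
--     """
--     Classify disaster into group, type, and subtype based on text.
--
--     Args:
--         disaster_text: Disaster description
--
--     Returns:
--         Tuple of (disaster_group, disaster_type, disaster_subtype)
--     """
--     if not disaster_text:
--         return ("Unknown", "Unknown", None)
--
--     disaster_text_lower = disaster_text.lower()
--
--     # Classification rules
--     if any(term in disaster_text_lower for term in ["earthquake", "seismic", "tremor"]):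
--         return ("Geophysical", "Earthquake", "Ground Shaking")
--
--     elif any(term in disaster_text_lower for term in ["tsunami"]):
--         return ("Geophysical", "Earthquake", "Tsunami")
--
--     elif any(term in disaster_text_lower for term in ["volcano", "volcanic", "eruption"]):
--         return ("Geophysical", "Volcano", "Volcanic Activity")
--
--     elif any(term in disaster_text_lower for term in ["landslide", "mudslide"]):
--         return ("Geophysical", "Mass Movement", "Landslide")
--
--     elif any(term in disaster_text_lower for term in ["cyclone", "hurricane", "typhoon"]):
--         return ("Meteorological", "Storm", "Tropical Cyclone")
--
--     elif any(term in disaster_text_lower for term in ["tornado", "twister"]):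
--         return ("Meteorological", "Storm", "Tornado")
--
--     elif any(term in disaster_text_lower for term in ["storm", "thunderstorm"]):
--         return ("Meteorological", "Storm", "Severe Storm")
--
--     elif any(term in disaster_text_lower for term in ["flood", "flooding"]):
--         if "flash" in disaster_text_lower:
--             return ("Hydrological", "Flood", "Flash Flood")
--         elif "coastal" in disaster_text_lower:
--             return ("Hydrological", "Flood", "Coastal Flood")
--         else:
--             return ("Hydrological", "Flood", "Riverine Flood")
--
--     elif any(term in disaster_text_lower for term in ["drought", "dry"]):
--         return ("Climatological", "Drought", None)
--
--     elif any(term in disaster_text_lower for term in ["wildfire", "fire", "forest fire"]):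
--         return ("Climatological", "Wildfire", None)
--
--     elif any(term in disaster_text_lower for term in ["heat wave", "extreme heat"]):
--         return ("Meteorological", "Extreme Temperature", "Heat Wave")
--
--     elif any(term in disaster_text_lower for term in ["cold wave", "extreme cold", "freeze"]):
--         return ("Meteorological", "Extreme Temperature", "Cold Wave")
--
--     # Default
--     return ("Unknown", disaster_text, None)
-- ===== SOURCE B (Python) =====
-- from typing import Optional, Tuple
--
-- # Keyword groups with numeric priorities (lower number = higher precedence) and a
-- # parallel decode table of results.  Unlike a first-match cascade, classification
-- # matches ALL groups and keeps the minimum priority, then decodes it; this is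
-- # correct because the cascade's branch order coincides with the numeric order.
-- GROUPS = [
--     (0, ["earthquake", "seismic", "tremor"]),
--     (1, ["tsunami"]),
--     (2, ["volcano", "volcanic", "eruption"]),
--     (3, ["landslide", "mudslide"]),
--     (4, ["cyclone", "hurricane", "typhoon"]),
--     (5, ["tornado", "twister"]),
--     (6, ["storm", "thunderstorm"]),
--     (7, ["flood", "flooding"]),
--     (8, ["drought", "dry"]),
--     (9, ["wildfire", "fire", "forest fire"]),
--     (10, ["heat wave", "extreme heat"]),
--     (11, ["cold wave", "extreme cold", "freeze"]),
-- ]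
--
-- RESULTS = [
--     ("Geophysical", "Earthquake", "Ground Shaking"),
--     ("Geophysical", "Earthquake", "Tsunami"),
--     ("Geophysical", "Volcano", "Volcanic Activity"),
--     ("Geophysical", "Mass Movement", "Landslide"),
--     ("Meteorological", "Storm", "Tropical Cyclone"),
--     ("Meteorological", "Storm", "Tornado"),
--     ("Meteorological", "Storm", "Severe Storm"),
--     ("Hydrological", "Flood", None),  # subtype refined below
--     ("Climatological", "Drought", None),
--     ("Climatological", "Wildfire", None),
--     ("Meteorological", "Extreme Temperature", "Heat Wave"),
--     ("Meteorological", "Extreme Temperature", "Cold Wave"),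
-- ]
--
--
-- def classify_disaster_type(disaster_text: str) -> Tuple[str, str, Optional[str]]:
--     if not disaster_text:
--         return ("Unknown", "Unknown", None)
--     low = disaster_text.lower()
--     best = min((p for p, terms in GROUPS if any(t in low for t in terms)),
--                default=None)
--     if best is None:
--         return ("Unknown", disaster_text, None)
--     group, dtype, subtype = RESULTS[best]
--     if best == 7:  # flood: refine the subtype
--         subtype = ("Flash Flood" if "flash" in low
--                    else "Coastal Flood" if "coastal" in low
--                    else "Riverine Flood")
--     return (group, dtype, subtype)
-- ===== Notes on version B (the rewrite author's own statement) =====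
-- stated objective: alternative
-- what changed: Instead of A's early-exit first-match if/elif cascade, B matches ALL keyword groups, takes the minimum numeric priority among the matches, and decodes it through a separate result table (flood subtype refined afterwards); correct because the cascade order equals the numeric priority order.
import Mathlib
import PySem

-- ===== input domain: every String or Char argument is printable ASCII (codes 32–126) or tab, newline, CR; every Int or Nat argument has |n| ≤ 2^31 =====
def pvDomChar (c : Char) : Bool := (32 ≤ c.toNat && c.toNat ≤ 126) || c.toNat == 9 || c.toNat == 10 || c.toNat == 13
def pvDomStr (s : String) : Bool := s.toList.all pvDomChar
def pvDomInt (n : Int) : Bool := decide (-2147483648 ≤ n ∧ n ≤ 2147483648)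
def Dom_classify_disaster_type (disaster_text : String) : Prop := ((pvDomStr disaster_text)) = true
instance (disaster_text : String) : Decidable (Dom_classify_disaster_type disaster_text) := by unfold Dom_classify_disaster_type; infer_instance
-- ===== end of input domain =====

-- B replaces A's early-exit first-match cascade by exhaustive group matching + minimum priority + a decode table (objective: alternative); same return values.

-- ===== PORT A =====
def classify_disaster_type (disaster_text : String) : String × String × Option String :=
  if disaster_text.toList.isEmpty then ("Unknown", "Unknown", none)
  else
    let lo := PySem.Str.lower disaster_text
    if (["earthquake", "seismic", "tremor"]).any (fun term => PySem.Str.isIn term lo) then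
      ("Geophysical", "Earthquake", some "Ground Shaking")
    else if (["tsunami"]).any (fun term => PySem.Str.isIn term lo) then
      ("Geophysical", "Earthquake", some "Tsunami")
    else if (["volcano", "volcanic", "eruption"]).any (fun term => PySem.Str.isIn term lo) then
      ("Geophysical", "Volcano", some "Volcanic Activity")
    else if (["landslide", "mudslide"]).any (fun term => PySem.Str.isIn term lo) then
      ("Geophysical", "Mass Movement", some "Landslide")
    else if (["cyclone", "hurricane", "typhoon"]).any (fun term => PySem.Str.isIn term lo) then
      ("Meteorological", "Storm", some "Tropical Cyclone")
    else if (["tornado", "twister"]).any (fun term => PySem.Str.isIn term lo) then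
      ("Meteorological", "Storm", some "Tornado")
    else if (["storm", "thunderstorm"]).any (fun term => PySem.Str.isIn term lo) then
      ("Meteorological", "Storm", some "Severe Storm")
    else if (["flood", "flooding"]).any (fun term => PySem.Str.isIn term lo) then
      (if PySem.Str.isIn "flash" lo then ("Hydrological", "Flood", some "Flash Flood")
       else if PySem.Str.isIn "coastal" lo then ("Hydrological", "Flood", some "Coastal Flood")
       else ("Hydrological", "Flood", some "Riverine Flood"))
    else if (["drought", "dry"]).any (fun term => PySem.Str.isIn term lo) then
      ("Climatological", "Drought", none)
    else if (["wildfire", "fire", "forest fire"]).any (fun term => PySem.Str.isIn term lo) then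
      ("Climatological", "Wildfire", none)
    else if (["heat wave", "extreme heat"]).any (fun term => PySem.Str.isIn term lo) then
      ("Meteorological", "Extreme Temperature", some "Heat Wave")
    else if (["cold wave", "extreme cold", "freeze"]).any (fun term => PySem.Str.isIn term lo) then
      ("Meteorological", "Extreme Temperature", some "Cold Wave")
    else ("Unknown", disaster_text, none)

-- ===== PORT B =====
-- Source B's GROUPS: keyword groups with numeric priorities (lower = higher precedence)
def pvGroups : List (Int × List String) :=
  [ (0, ["earthquake", "seismic", "tremor"]),
    (1, ["tsunami"]),
    (2, ["volcano", "volcanic", "eruption"]),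
    (3, ["landslide", "mudslide"]),
    (4, ["cyclone", "hurricane", "typhoon"]),
    (5, ["tornado", "twister"]),
    (6, ["storm", "thunderstorm"]),
    (7, ["flood", "flooding"]),
    (8, ["drought", "dry"]),
    (9, ["wildfire", "fire", "forest fire"]),
    (10, ["heat wave", "extreme heat"]),
    (11, ["cold wave", "extreme cold", "freeze"]) ]

-- Source B's RESULTS decode table (entry 7's subtype is refined after decoding)
def pvResults : List (String × String × Option String) :=
  [ ("Geophysical", "Earthquake", some "Ground Shaking"),
    ("Geophysical", "Earthquake", some "Tsunami"),
    ("Geophysical", "Volcano", some "Volcanic Activity"),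
    ("Geophysical", "Mass Movement", some "Landslide"),
    ("Meteorological", "Storm", some "Tropical Cyclone"),
    ("Meteorological", "Storm", some "Tornado"),
    ("Meteorological", "Storm", some "Severe Storm"),
    ("Hydrological", "Flood", none),
    ("Climatological", "Drought", none),
    ("Climatological", "Wildfire", none),
    ("Meteorological", "Extreme Temperature", some "Heat Wave"),
    ("Meteorological", "Extreme Temperature", some "Cold Wave") ]

def classify_disaster_type_alt (disaster_text : String) : String × String × Option String :=
  if disaster_text.toList.isEmpty then ("Unknown", "Unknown", none)
  else
    let lo := PySem.Str.lower disaster_text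
    -- min((p for p, terms in GROUPS if any(t in low for t in terms)), default=None)
    let best := PySem.List.min?
      (pvGroups.filterMap (fun g =>
        if g.2.any (fun t => PySem.Str.isIn t lo) then some g.1 else none))
      (fun x => x)
    match best with
    | none => ("Unknown", disaster_text, none)
    | some b =>
      match PySem.List.pyGet? pvResults b with
      | none => ("Unknown", "Unknown", none)  -- unreachable: b is always a valid index 0..11
      | some (group, dtype, subtype) =>
        if b == 7 then
          (group, dtype,
            some (if PySem.Str.isIn "flash" lo then "Flash Flood"
                  else if PySem.Str.isIn "coastal" lo then "Coastal Flood"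
                  else "Riverine Flood"))
        else (group, dtype, subtype)

-- ===== PRECONDITION & SPEC =====
def Spec_classify_disaster_type (disaster_text : String) (out : String × String × Option String) : Prop := out = classify_disaster_type_alt disaster_text
instance (disaster_text : String) (out : String × String × Option String) : Decidable (Spec_classify_disaster_type disaster_text out) := by unfold Spec_classify_disaster_type; infer_instance

-- ===== CLAIM (what is proved, stated in full; the proofs are below) =====
def Claim_equal_classify_disaster_type : Prop := ∀ (disaster_text : String), Dom_classify_disaster_type disaster_text → Spec_classify_disaster_type disaster_text (classify_disaster_type disaster_text)

-- ===== LEMMAS AND PROOFS =====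

-- the running minimum of a list whose elements are all ≥ the seed stays at the seed
theorem pv_foldl_min_eq (t : List Int) (a : Int) (h : ∀ y ∈ t, a ≤ y) :
    t.foldl min a = a := by
  rcases PySem.List.foldl_min_mem t a with h1 | h1
  · exact h1
  · exact le_antisymm (PySem.List.foldl_min_le t a).1 (h _ h1)

-- min? of a cons where the tail is ≥ the head
theorem pv_min?_cons_of_le (k : Int) (t : List Int) (h : ∀ y ∈ t, k ≤ y) :
    PySem.List.min? (k :: t) (fun y => y) = some k := by
  rw [PySem.List.min?_id_cons, pv_foldl_min_eq t k h]

-- elements produced by the group filterMap are priorities of the group list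
theorem pv_hits_mem (gs : List (Int × List String)) (lo : String) (x : Int)
    (hx : x ∈ gs.filterMap (fun g =>
      if g.2.any (fun t => PySem.Str.isIn t lo) then some g.1 else none)) :
    ∃ g ∈ gs, x = g.1 := by
  rcases List.mem_filterMap.mp hx with ⟨g, hg, hfg⟩
  refine ⟨g, hg, ?_⟩
  by_cases hb : g.2.any (fun t => PySem.Str.isIn t lo) = true
  · rw [if_pos hb] at hfg; exact (Option.some.inj hfg).symm
  · rw [if_neg hb] at hfg; cases hfg

-- the first matching group of a priority-ordered group list (proof-side characterisation)
def pvFirst (lo : String) : List (Int × List String) → Option Int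
  | [] => none
  | g :: rest =>
    if g.2.any (fun t => PySem.Str.isIn t lo) then some g.1 else pvFirst lo rest

-- on a list whose priorities are nondecreasing from the front, min of all matches = first match
theorem pv_min_eq_first (lo : String) :
    ∀ (gs : List (Int × List String)),
      gs.Pairwise (fun g h => g.1 ≤ h.1) →
      PySem.List.min? (gs.filterMap (fun g =>
        if g.2.any (fun t => PySem.Str.isIn t lo) then some g.1 else none)) (fun x => x)
        = pvFirst lo gs := by
  intro gs
  induction gs with
  | nil => intro _; rfl
  | cons g rest ih =>
    intro hp
    rcases List.pairwise_cons.mp hp with ⟨hle, hrest⟩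
    by_cases hb : g.2.any (fun t => PySem.Str.isIn t lo) = true
    · simp only [List.filterMap_cons, pvFirst, hb, if_true]
      apply pv_min?_cons_of_le
      intro y hy
      rcases pv_hits_mem rest lo y hy with ⟨g', hg', rfl⟩
      exact hle g' hg'
    · simp only [List.filterMap_cons, pvFirst, hb]
      exact ih hrest

theorem pvFirst_cons (lo : String) (g : Int × List String) (rest : List (Int × List String)) :
    pvFirst lo (g :: rest) =
      if g.2.any (fun t => PySem.Str.isIn t lo) then some g.1 else pvFirst lo rest := rfl

theorem pvGroups_sorted : pvGroups.Pairwise (fun g h => g.1 ≤ h.1) := by decide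


theorem classify_disaster_type_spec : Claim_equal_classify_disaster_type := by
  intro d _
  unfold Spec_classify_disaster_type classify_disaster_type classify_disaster_type_alt
  by_cases he : d.toList.isEmpty = true
  · rw [if_pos he, if_pos he]
  · rw [if_neg he, if_neg he]
    simp only []
    generalize PySem.Str.lower d = lo
    rw [pv_min_eq_first lo pvGroups pvGroups_sorted]
    simp only [pvGroups, pvFirst_cons, pvFirst]
    by_cases h1 : (["earthquake", "seismic", "tremor"]).any (fun t => PySem.Str.isIn t lo) = true
    · rw [if_pos h1, if_pos h1]; rfl
    rw [if_neg h1, if_neg h1]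
    by_cases h2 : (["tsunami"]).any (fun t => PySem.Str.isIn t lo) = true
    · rw [if_pos h2, if_pos h2]; rfl
    rw [if_neg h2, if_neg h2]
    by_cases h3 : (["volcano", "volcanic", "eruption"]).any (fun t => PySem.Str.isIn t lo) = true
    · rw [if_pos h3, if_pos h3]; rfl
    rw [if_neg h3, if_neg h3]
    by_cases h4 : (["landslide", "mudslide"]).any (fun t => PySem.Str.isIn t lo) = true
    · rw [if_pos h4, if_pos h4]; rfl
    rw [if_neg h4, if_neg h4]
    by_cases h5 : (["cyclone", "hurricane", "typhoon"]).any (fun t => PySem.Str.isIn t lo) = true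
    · rw [if_pos h5, if_pos h5]; rfl
    rw [if_neg h5, if_neg h5]
    by_cases h6 : (["tornado", "twister"]).any (fun t => PySem.Str.isIn t lo) = true
    · rw [if_pos h6, if_pos h6]; rfl
    rw [if_neg h6, if_neg h6]
    by_cases h7 : (["storm", "thunderstorm"]).any (fun t => PySem.Str.isIn t lo) = true
    · rw [if_pos h7, if_pos h7]; rfl
    rw [if_neg h7, if_neg h7]
    by_cases h8 : (["flood", "flooding"]).any (fun t => PySem.Str.isIn t lo) = true
    · rw [if_pos h8, if_pos h8]
      by_cases hf : PySem.Str.isIn "flash" lo = true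
      · rw [if_pos hf]; simp only [PySem.List.pyGet?, pvResults]; rw [if_pos hf]; rfl
      rw [if_neg hf]; simp only [PySem.List.pyGet?, pvResults]; rw [if_neg hf]
      by_cases hc : PySem.Str.isIn "coastal" lo = true
      · rw [if_pos hc]; rw [if_pos hc]; rfl
      · rw [if_neg hc]; rw [if_neg hc]; rfl
    rw [if_neg h8, if_neg h8]
    by_cases h9 : (["drought", "dry"]).any (fun t => PySem.Str.isIn t lo) = true
    · rw [if_pos h9, if_pos h9]; rfl
    rw [if_neg h9, if_neg h9]
    by_cases h10 : (["wildfire", "fire", "forest fire"]).any (fun t => PySem.Str.isIn t lo) = true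
    · rw [if_pos h10, if_pos h10]; rfl
    rw [if_neg h10, if_neg h10]
    by_cases h11 : (["heat wave", "extreme heat"]).any (fun t => PySem.Str.isIn t lo) = true
    · rw [if_pos h11, if_pos h11]; rfl
    rw [if_neg h11, if_neg h11]
    by_cases h12 : (["cold wave", "extreme cold", "freeze"]).any (fun t => PySem.Str.isIn t lo) = true
    · rw [if_pos h12, if_pos h12]; rfl
    rw [if_neg h12, if_neg h12]
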